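-- pv_equiv track=rewrite | github.com/justfortestingnothibghere/TeamDev-X-NearalHub | bot.py | get_best_media
-- ===== SOURCE A (Python) =====
-- AUDIO_EXTS      = ("mp3","m4a","opus","ogg","flac","wav")
--
-- MIN_VIDEO_HEIGHT = 240
--
-- def _quality_to_int(q) -> int:
--     if not q: return 0
--     try: return int(str(q).lower().replace("p","").strip())
--     except Exception: return 0
--
-- def _filter_min_quality(medias: list) -> list:
--     audios  = [m for m in medias if m.get("ext") in AUDIO_EXTS]
--     videos  = [m for m in medias if m.get("ext") not in AUDIO_EXTS]
--     filtered = [v for v in videos if _quality_to_int(v.get("quality")) >= MIN_VIDEO_HEIGHT]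
--     if not filtered and videos:
--         filtered = [sorted(videos, key=lambda x: _quality_to_int(x.get("quality")))[0]]
--     return filtered + audios
--
-- def get_best_media(medias: list) -> dict:
--     filtered = _filter_min_quality(medias)
--     audios = [m for m in filtered if m.get("ext") in AUDIO_EXTS]
--     videos = [m for m in filtered if m.get("ext") not in AUDIO_EXTS]
--     if videos:
--         return sorted(videos, key=lambda x: _quality_to_int(x.get("quality")), reverse=True)[0]
--     if audios:
--         return sorted(audios, key=lambda x: _quality_to_int(x.get("quality")), reverse=True)[0]
--     return medias[0] if medias else None
-- ===== SOURCE B (Python) =====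
-- AUDIO_EXTS = ("mp3", "m4a", "opus", "ogg", "flac", "wav")
--
-- MIN_VIDEO_HEIGHT = 240
--
-- def _quality_to_int(q) -> int:
--     if not q: return 0
--     try: return int(str(q).lower().replace("p", "").strip())
--     except Exception: return 0
--
-- def get_best_media(medias: list) -> dict:
--     videos, audios = [], []
--     for m in medias:
--         (audios if m.get("ext") in AUDIO_EXTS else videos).append(m)
--     q = lambda m: _quality_to_int(m.get("quality"))
--     if videos:
--         eligible = [v for v in videos if q(v) >= MIN_VIDEO_HEIGHT]
--         return max(eligible, key=q) if eligible else min(videos, key=q)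
--     if audios:
--         return max(audios, key=q)
--     return None
-- ===== Notes on version B (the rewrite author's own statement) =====
-- stated objective: simpler
-- what changed: Replaces the _filter_min_quality helper with its concat-and-resplit and two full stable sorts by a single one-pass partition followed by a direct max/min selection (Python's max/min return the first extremal element, matching the stable sorts' tie-breaking).
import Mathlib
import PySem

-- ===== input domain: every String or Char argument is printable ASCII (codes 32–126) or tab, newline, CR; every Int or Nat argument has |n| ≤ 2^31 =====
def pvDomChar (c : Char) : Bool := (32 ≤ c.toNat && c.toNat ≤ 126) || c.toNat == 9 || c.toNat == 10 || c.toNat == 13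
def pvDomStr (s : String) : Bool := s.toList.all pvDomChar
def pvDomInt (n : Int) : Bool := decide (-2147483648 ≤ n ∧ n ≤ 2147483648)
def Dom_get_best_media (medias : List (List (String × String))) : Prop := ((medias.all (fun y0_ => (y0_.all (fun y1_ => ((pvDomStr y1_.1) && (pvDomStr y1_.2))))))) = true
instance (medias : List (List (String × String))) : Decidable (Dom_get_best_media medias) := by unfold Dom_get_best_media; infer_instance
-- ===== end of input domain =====

-- B replaces the helper's filter/concat/re-split and the two stable sorts by a one-pass
-- partition plus a direct first-extremal max/min selection (objective: simpler).

-- ===== PORT A =====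
-- shared module constants / helpers (module-level in both Pythons)
def pvAudioExts : List String := ["mp3", "m4a", "opus", "ogg", "flac", "wav"]

def pvMinVideoHeight : Int := 240

-- _quality_to_int(q) for q = m.get("quality") : Option String ('not q' = None or "")
def pvQualityToInt (q : Option String) : Int :=
  match q with
  | none => 0
  | some s =>
    if s.toList.isEmpty then 0
    else
      match PySem.Int.ofStr? (PySem.Str.strip (PySem.Str.replace (PySem.Str.lower s) "p" "")) with
      | some n => n
      | none => 0

-- m.get(k) on a dict (association list, first match)
def pvGet (m : List (String × String)) (k : String) : Option String :=
  (PySem.Dict.mk m).get? k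

-- m.get("ext") in AUDIO_EXTS  (None in AUDIO_EXTS is False)
def pvIsAudio (m : List (String × String)) : Bool :=
  match pvGet m "ext" with
  | some e => pvAudioExts.contains e
  | none => false

-- key lambda: _quality_to_int(x.get("quality"))
def pvQ (m : List (String × String)) : Int := pvQualityToInt (pvGet m "quality")

-- _filter_min_quality(medias)
def pvFilterMinQuality (medias : List (List (String × String))) : List (List (String × String)) :=
  let audios := medias.filter (fun m => pvIsAudio m)
  let videos := medias.filter (fun m => !pvIsAudio m)
  let filtered := videos.filter (fun v => decide (pvMinVideoHeight ≤ pvQ v))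
  let filtered2 :=
    if filtered.isEmpty && !videos.isEmpty then
      -- [sorted(videos, key=…)[0]] ; videos ≠ [] so the [] branch is unreachable
      match PySem.List.sorted videos pvQ false with
      | x :: _ => [x]
      | [] => []
    else filtered
  filtered2 ++ audios

def get_best_media (medias : List (List (String × String))) : Option (List (String × String)) :=
  let filtered := pvFilterMinQuality medias
  let audios := filtered.filter (fun m => pvIsAudio m)
  let videos := filtered.filter (fun m => !pvIsAudio m)
  if !videos.isEmpty then (PySem.List.sorted videos pvQ true).head?
  else if !audios.isEmpty then (PySem.List.sorted audios pvQ true).head?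
  else if !medias.isEmpty then medias.head? else none

-- ===== PORT B =====
def get_best_media_alt (medias : List (List (String × String))) : Option (List (String × String)) :=
  -- one-pass partition: for m in medias: (audios if audio else videos).append(m)
  let p := medias.foldl
    (fun (p : List (List (String × String)) × List (List (String × String))) m =>
      if pvIsAudio m then (p.1, p.2 ++ [m]) else (p.1 ++ [m], p.2)) ([], [])
  let videos := p.1
  let audios := p.2
  if !videos.isEmpty then
    let eligible := videos.filter (fun v => decide (pvMinVideoHeight ≤ pvQ v))
    if !eligible.isEmpty then PySem.List.max? eligible pvQ
    else PySem.List.min? videos pvQ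
  else if !audios.isEmpty then PySem.List.max? audios pvQ
  else none

-- ===== PRECONDITION & SPEC =====
def Spec_get_best_media (medias : List (List (String × String))) (out : Option (List (String × String))) : Prop := out = get_best_media_alt medias
instance (medias : List (List (String × String))) (out : Option (List (String × String))) : Decidable (Spec_get_best_media medias out) := by unfold Spec_get_best_media; infer_instance

-- ===== CLAIM (what is proved, stated in full; the proofs are below) =====
def Claim_equal_get_best_media : Prop := ∀ (medias : List (List (String × String))), Dom_get_best_media medias → Spec_get_best_media medias (get_best_media medias)

-- ===== LEMMAS AND PROOFS =====

-- head of a stable reverse sort = first maximal element (Python max with key)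
theorem pv_ins_head {α : Type} (key : α → Int) (x : α) (acc : List α) :
  (PySem.List.insertBy (fun a b => decide (key b < key a)) x acc).head? =
    (match acc.head? with
     | none => some x
     | some m => if key m < key x then some x else some m) := by
  cases acc with
  | nil => simp [PySem.List.insertBy]
  | cons h t =>
    simp only [PySem.List.insertBy]
    by_cases hc : key h < key x <;> simp [hc]

theorem pv_fold_head_rev {α : Type} (key : α → Int) (xs acc : List α) :
  ((xs.foldl (fun acc x => PySem.List.insertBy (fun a b => decide (key b < key a)) x acc) acc)).head? =
  xs.foldl (fun o x => match o with | none => some x | some m => if key m < key x then some x else some m) acc.head? := by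
  induction xs generalizing acc with
  | nil => rfl
  | cons x t ih => simp only [List.foldl_cons, ih, pv_ins_head]

theorem pv_head_sorted_rev {α : Type} (xs : List α) (key : α → Int) :
    (PySem.List.sorted xs key true).head? = PySem.List.max? xs key := by
  simp only [PySem.List.sorted]
  rw [if_pos trivial, pv_fold_head_rev]
  rfl

-- head of a stable sort = first minimal element (Python min with key)
theorem pv_ins_head' {α : Type} (key : α → Int) (x : α) (acc : List α) :
  (PySem.List.insertBy (fun a b => decide (key a < key b)) x acc).head? =
    (match acc.head? with
     | none => some x
     | some m => if key x < key m then some x else some m) := by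
  cases acc with
  | nil => simp [PySem.List.insertBy]
  | cons h t =>
    simp only [PySem.List.insertBy]
    by_cases hc : key x < key h <;> simp [hc]

theorem pv_fold_head {α : Type} (key : α → Int) (xs acc : List α) :
  ((xs.foldl (fun acc x => PySem.List.insertBy (fun a b => decide (key a < key b)) x acc) acc)).head? =
  xs.foldl (fun o x => match o with | none => some x | some m => if key x < key m then some x else some m) acc.head? := by
  induction xs generalizing acc with
  | nil => rfl
  | cons x t ih => simp only [List.foldl_cons, ih, pv_ins_head']

theorem pv_head_sorted {α : Type} (xs : List α) (key : α → Int) :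
    (PySem.List.sorted xs key false).head? = PySem.List.min? xs key := by
  simp only [PySem.List.sorted]
  rw [if_neg (by simp), pv_fold_head]
  rfl

-- B's partition loop computes the two filters
theorem pv_partition (medias : List (List (String × String)))
    (a b : List (List (String × String))) :
    medias.foldl
      (fun (p : List (List (String × String)) × List (List (String × String))) m =>
        if pvIsAudio m then (p.1, p.2 ++ [m]) else (p.1 ++ [m], p.2)) (a, b)
    = (a ++ medias.filter (fun m => !pvIsAudio m), b ++ medias.filter (fun m => pvIsAudio m)) := by
  induction medias generalizing a b with
  | nil => simp
  | cons m t ih => by_cases h : pvIsAudio m = true <;> simp [h, ih]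

theorem pv_nil_of_filters_nil {α : Type} (l : List α) (p : α → Bool)
    (h1 : l.filter p = []) (h2 : l.filter (fun x => !p x) = []) : l = [] := by
  cases l with
  | nil => rfl
  | cons x t =>
    by_cases h : p x = true <;> simp [h] at h1 h2

-- ===== VERDICT (by name: the statement is the Claim_ definition above) =====
theorem get_best_media_spec : Claim_equal_get_best_media := by
  intro medias _
  show get_best_media medias = get_best_media_alt medias
  simp only [get_best_media, get_best_media_alt, pvFilterMinQuality, pv_partition, List.nil_append]
  set V := List.filter (fun m => !pvIsAudio m) medias with hVdef
  set Au := List.filter (fun m => pvIsAudio m) medias with hAudef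
  set E := List.filter (fun v => decide (pvMinVideoHeight ≤ pvQ v)) V with hEdef
  have hAumem : ∀ a ∈ Au, pvIsAudio a = true := fun a ha => List.of_mem_filter ha
  have hVmem : ∀ a ∈ V, pvIsAudio a = false := fun a ha => by
    have h := List.of_mem_filter (p := fun m => !pvIsAudio m) ha; simpa using h
  have hAuAu : Au.filter (fun m => pvIsAudio m) = Au := List.filter_eq_self.mpr hAumem
  have hAuV : Au.filter (fun m => !pvIsAudio m) = [] :=
    List.filter_eq_nil_iff.mpr (fun a ha => by simp [hAumem a ha])
  by_cases hV : V = []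
  · have hE : E = [] := by rw [hEdef, hV]; rfl
    rw [hE, hV]
    by_cases hAu : Au = []
    · have hm : medias = [] := pv_nil_of_filters_nil medias pvIsAudio (hAudef ▸ hAu) (hVdef ▸ hV)
      simp [hAu, hm]
    · simp [hAu, hAuV, hAuAu, pv_head_sorted_rev]
  · by_cases hE : E = []
    · rw [hE]
      obtain ⟨x, t, hst⟩ := List.exists_cons_of_ne_nil
        ((PySem.List.sorted_eq_nil_iff (xs := V) (key := pvQ) (rev := false)).ne.mpr hV)
      have hx : x ∈ V := (PySem.List.mem_sorted V pvQ false x).mp (hst ▸ List.mem_cons_self)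
      have hxa : pvIsAudio x = false := hVmem x hx
      have hmin : PySem.List.min? V pvQ = some x := by rw [← pv_head_sorted, hst]; rfl
      have hone : PySem.List.sorted [x] pvQ true = [x] := rfl
      simp [hst, hV, hAuV, hxa, hmin, hone]
    · have hcond : (E.isEmpty && !V.isEmpty) = false := by simp [hE]
      rw [hcond]
      have hEmem : ∀ a ∈ E, pvIsAudio a = false := fun a ha => hVmem a (List.mem_of_mem_filter ha)
      have hEV : E.filter (fun m => !pvIsAudio m) = E :=
        List.filter_eq_self.mpr (fun a ha => by simp [hEmem a ha])
      simp [List.filter_append, hEV, hAuV, hE, pv_head_sorted_rev]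
      exact fun h => absurd h hV
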